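-- pv_equiv track=rewrite | github.com/micropython/micropython | ports/silabs/tools/make_pins.py | make_pin_function_lists
-- ===== SOURCE A (Python) =====
-- def make_pin_function_list_decl(pin, fcns):
--     """Create a pin function list declaration"""
--     decl = "\nconst uint8_t pin_" + pin + "_functions[] = { \n"
--     if len(fcns) > 0:
--         decl += str(fcns[0])
--         for i in fcns[1:]:
--             decl += ", " + str(i)
--     decl += "\n};\n"
--     return decl
--
-- def make_pin_function_lists(functions, pins):
--     """Create lists of pin functions from the parsed CSV data"""
--     fcn_list = {}
--     decl = ""
--     i = 0
--     for fcn, fcn_pins in sorted(functions.items()):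
--         for j in range(0, len(fcn_pins)):
--             pin = fcn_pins[j].lower()
--             if pin == "":
--                 continue
--             if pin not in fcn_list:
--                 fcn_list[pin] = [255] * len(functions)
--             fcn_list[pin][i] = 1
--         i += 1
--     for pin in pins.keys():
--         if not pin in fcn_list:
--             fcn_list[pin] = []
--
--         decl += make_pin_function_list_decl(pin, fcn_list[pin])
--
--     return decl
-- ===== SOURCE B (Python) =====
-- def make_pin_function_list_decl(pin, fcns):
--     """Create a pin function list declaration"""
--     decl = "\nconst uint8_t pin_" + pin + "_functions[] = { \n"
--     if len(fcns) > 0: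
--         decl += str(fcns[0])
--         for i in fcns[1:]:
--             decl += ", " + str(i)
--     decl += "\n};\n"
--     return decl
--
-- def make_pin_function_lists(functions, pins):
--     """Create lists of pin functions from the parsed CSV data"""
--     occurring = {q.lower() for fcn_pins in functions.values() for q in fcn_pins if q.lower() != ""}
--     sorted_fcns = sorted(functions.items())
--     parts = []
--     for pin in pins.keys():
--         if pin in occurring:
--             fcns = [1 if pin in [q.lower() for q in fcn_pins] else 255
--                     for _fcn, fcn_pins in sorted_fcns]
--         else:
--             fcns = []
--         parts.append(make_pin_function_list_decl(pin, fcns))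
--     return "".join(parts)
-- ===== Notes on version B (the rewrite author's own statement) =====
-- stated objective: simpler
-- what changed: Replaces A's scatter pass that builds a pin->255-array dict (allocating [255]*len(functions) and writing 1s at a running index, then a second dict-threading pass) with a direct per-output-pin gather: an occurrence set of lowercased non-empty pins built once, then for each requested pin its list is read off the sorted functions in one comprehension and the parts are joined.
import Mathlib
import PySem

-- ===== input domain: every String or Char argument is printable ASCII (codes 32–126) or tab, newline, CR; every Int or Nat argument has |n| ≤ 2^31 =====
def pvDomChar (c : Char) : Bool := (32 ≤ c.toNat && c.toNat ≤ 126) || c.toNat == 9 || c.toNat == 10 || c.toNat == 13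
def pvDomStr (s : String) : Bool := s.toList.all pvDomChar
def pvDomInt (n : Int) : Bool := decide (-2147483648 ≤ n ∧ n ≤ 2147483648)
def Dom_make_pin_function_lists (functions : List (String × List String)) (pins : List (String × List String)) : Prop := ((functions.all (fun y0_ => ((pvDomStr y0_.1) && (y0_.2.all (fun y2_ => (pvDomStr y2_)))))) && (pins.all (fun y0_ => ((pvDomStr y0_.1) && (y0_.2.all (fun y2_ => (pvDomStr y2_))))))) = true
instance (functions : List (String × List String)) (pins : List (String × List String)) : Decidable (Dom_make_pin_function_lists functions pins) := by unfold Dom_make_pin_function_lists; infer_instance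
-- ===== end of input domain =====

-- B replaces A's scatter-into-a-255-matrix first pass by a direct per-output-pin gather over the
-- sorted functions (objective: simpler decomposition; same return value).
-- Both Pythons receive dicts; the assoc-list arguments are read through PySem.Dict.ofList
-- (insertion order, later value overwrites, position kept), exactly what dict(...) builds.

-- ===== PORT A =====
def make_pin_function_list_decl (pin : String) (fcns : List Int) : String :=
  let decl := "\nconst uint8_t pin_" ++ pin ++ "_functions[] = { \n"
  let decl :=
    match fcns with                      -- `if len(fcns) > 0: fcns[0] … for i in fcns[1:]`
    | [] => decl
    | f0 :: rest => rest.foldl (fun d i => d ++ ", " ++ PySem.Int.toStr i) (decl ++ PySem.Int.toStr f0)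
  decl ++ "\n};\n"

def make_pin_function_lists (functions : List (String × List String)) (pins : List (String × List String)) : String :=
  let functionsD := PySem.Dict.ofList functions
  let pinsD := PySem.Dict.ofList pins
  let n := functionsD.items.length      -- len(functions)
  -- keys of a dict are distinct, so Python's tuple sort of items never compares values:
  -- sorting by the key alone is exact
  let sfns := PySem.List.sorted functionsD.items (fun p => p.1) false
  let st :=
    sfns.foldl
      (fun (st : PySem.Dict String (List Int) × Int) fp =>
        let fcn_list :=
          (PySem.List.pyRange 0 (PySem.List.len fp.2) 1).foldl
            (fun fl j =>
              let pin := PySem.Str.lower (PySem.List.pyGetD fp.2 j "")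
              if pin = "" then fl
              else
                let fl := if fl.contains pin then fl else fl.insert pin (List.replicate n (255 : Int))
                fl.modify pin [] (fun arr => PySem.List.pySetD arr st.2 1))
            st.1
        (fcn_list, st.2 + 1))
      ((PySem.Dict.empty : PySem.Dict String (List Int)), (0 : Int))
  (pinsD.keys.foldl
    (fun (acc : String × PySem.Dict String (List Int)) pin =>
      let fl := if acc.2.contains pin then acc.2 else acc.2.insert pin []
      (acc.1 ++ make_pin_function_list_decl pin (fl.getD pin []), fl))
    ("", st.1)).1

-- ===== PORT B =====
def make_pin_function_lists_alt (functions : List (String × List String)) (pins : List (String × List String)) : String :=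
  let functionsD := PySem.Dict.ofList functions
  let pinsD := PySem.Dict.ofList pins
  let occurring : PySem.Set String :=
    PySem.Set.ofList
      (functionsD.values.flatMap (fun fcn_pins =>
        (fcn_pins.map PySem.Str.lower).filter (fun q => q ≠ "")))
  let sorted_fcns := PySem.List.sorted functionsD.items (fun p => p.1) false
  PySem.Str.join ""
    (pinsD.keys.map (fun pin =>
      let fcns : List Int :=
        if PySem.Set.contains occurring pin then
          sorted_fcns.map (fun fp => if (fp.2.map PySem.Str.lower).contains pin then 1 else 255)
        else []
      make_pin_function_list_decl pin fcns))

-- ===== PRECONDITION & SPEC =====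
def Spec_make_pin_function_lists (functions : List (String × List String)) (pins : List (String × List String)) (out : String) : Prop := out = make_pin_function_lists_alt functions pins
instance (functions : List (String × List String)) (pins : List (String × List String)) (out : String) : Decidable (Spec_make_pin_function_lists functions pins out) := by unfold Spec_make_pin_function_lists; infer_instance

-- ===== CLAIM (what is proved, stated in full; the proofs are below) =====
def Claim_equal_make_pin_function_lists : Prop := ∀ (functions : List (String × List String)) (pins : List (String × List String)), Dom_make_pin_function_lists functions pins → Spec_make_pin_function_lists functions pins (make_pin_function_lists functions pins)

-- ===== LEMMAS AND PROOFS =====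

-- proof-side helpers: a name for A's inner/outer loop bodies and for the value A's first
-- phase stores for a pin

def pvInner (n : Nat) (i : Int) (fl : PySem.Dict String (List Int)) (q : String) : PySem.Dict String (List Int) :=
  let pin := PySem.Str.lower q
  if pin = "" then fl
  else
    let fl := if fl.contains pin then fl else fl.insert pin (List.replicate n (255 : Int))
    fl.modify pin [] (fun arr => PySem.List.pySetD arr i 1)

def pvStep (n : Nat) (st : PySem.Dict String (List Int) × Int) (fp : String × List String) :
    PySem.Dict String (List Int) × Int :=
  (fp.2.foldl (pvInner n st.2) st.1, st.2 + 1)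

def pvHits (p : String) (ps : List String) : Bool := (ps.map PySem.Str.lower).contains p

def pvOcc (p : String) (sl : List (String × List String)) : Bool := sl.any (fun fp => pvHits p fp.2)

def pvBuild (arr : List Int) (i : Nat) (sl : List (String × List String)) (p : String) : List Int :=
  match sl with
  | [] => arr
  | fp :: tl => pvBuild (if pvHits p fp.2 then arr.set i 1 else arr) (i + 1) tl p

lemma pv_stepA_eq (n : Nat) :
    (fun (st : PySem.Dict String (List Int) × Int) (fp : String × List String) =>
      ((PySem.List.pyRange 0 (PySem.List.len fp.2) 1).foldl
        (fun fl j =>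
          let pin := PySem.Str.lower (PySem.List.pyGetD fp.2 j "")
          if pin = "" then fl
          else
            let fl := if fl.contains pin then fl else fl.insert pin (List.replicate n (255 : Int))
            fl.modify pin [] (fun arr => PySem.List.pySetD arr st.2 1))
        st.1, st.2 + 1)) = pvStep n := by
  funext st fp
  simp only [pvStep, PySem.List.len_eq]
  refine Prod.ext ?_ rfl
  exact PySem.List.foldl_pyRange_zero_pyGetD' fp.2 "" (pvInner n st.2) st.1

lemma pv_inner_get? (n : Nat) (i : Int) (hi : 0 ≤ i) :
    ∀ (ps : List String) (fl : PySem.Dict String (List Int)) (p : String),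
      (ps.foldl (pvInner n i) fl).get? p =
        if p ≠ "" ∧ pvHits p ps
        then some (((fl.get? p).getD (List.replicate n 255)).set i.toNat 1)
        else fl.get? p := by
  intro ps
  induction ps with
  | nil => intro fl p; simp [pvHits]
  | cons q tl ih =>
    intro fl p
    simp only [List.foldl_cons]
    by_cases hq : PySem.Str.lower q = ""
    · rw [show pvInner n i fl q = fl by simp [pvInner, hq]]
      rw [ih]
      by_cases hp : p = ""
      · simp [hp]
      · have : pvHits p (q :: tl) = pvHits p tl := by
          simp [pvHits]
          intro h; rw [hq] at h; exact absurd h hp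
        rw [this]
    · by_cases hp : p = PySem.Str.lower q
      · -- the processed entry IS p
        have hpne : ¬ p = "" := by rw [hp]; exact hq
        have h2 : (pvInner n i fl q).get? p =
            some (((fl.get? p).getD (List.replicate n 255)).set i.toNat 1) := by
          by_cases hc : fl.contains p
          · obtain ⟨arr, harr⟩ : ∃ arr, fl.get? p = some arr := by
              rw [PySem.Dict.contains_eq_isSome_get?] at hc
              exact Option.isSome_iff_exists.mp hc
            simp [pvInner, ← hp, hpne, hc, PySem.Dict.modify, PySem.Dict.getD, harr,
              PySem.List.pySetD_of_nonneg _ _ hi, PySem.Dict.get?_insert_self]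
          · have hnone : fl.get? p = none := by
              rw [PySem.Dict.get?_eq_none_iff_contains]; simpa using hc
            simp [pvInner, ← hp, hpne, hc, PySem.Dict.modify, PySem.Dict.getD, hnone,
              PySem.List.pySetD_of_nonneg _ _ hi, PySem.Dict.get?_insert_self]
        rw [ih, h2]
        have hits : pvHits p (q :: tl) = true := by simp [pvHits, hp]
        have hpne : p ≠ "" := by rw [hp]; exact hq
        by_cases ht : pvHits p tl
        · simp [hits, ht, hpne, List.set_set]
        · simp [hits, ht, hpne]
      · -- another key: the step does not touch p
        have h2 : (pvInner n i fl q).get? p = fl.get? p := by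
          by_cases hc : fl.contains (PySem.Str.lower q) <;>
            simp [pvInner, hq, hc, PySem.Dict.modify,
              PySem.Dict.get?_insert_of_ne _ _ hp]
        rw [ih, h2]
        have : pvHits p (q :: tl) = pvHits p tl := by
          simp [pvHits]
          intro h; exact absurd h hp
        rw [this]

lemma pv_outer_get? (n : Nat) :
    ∀ (sl : List (String × List String)) (d : PySem.Dict String (List Int)) (i : Int)
      (_hi : 0 ≤ i) (p : String),
      ((sl.foldl (pvStep n) (d, i)).1).get? p =
        if p = "" then d.get? p
        else
          match d.get? p with
          | some arr => some (pvBuild arr i.toNat sl p)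
          | none =>
            if pvOcc p sl then some (pvBuild (List.replicate n 255) i.toNat sl p) else none := by
  intro sl
  induction sl with
  | nil =>
    intro d i _ p
    by_cases hp : p = ""
    · simp [hp]
    · simp only [List.foldl_nil, hp, if_neg, not_false_iff, pvOcc, pvBuild]
      cases d.get? p <;> simp
  | cons fp tl ih =>
    intro d i hi p
    simp only [List.foldl_cons]
    have hstep : pvStep n (d, i) fp = (fp.2.foldl (pvInner n i) d, i + 1) := rfl
    rw [hstep, ih _ _ (by omega) p, pv_inner_get? n i hi fp.2 d p]
    have htn : (i + 1).toNat = i.toNat + 1 := by omega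
    by_cases hp : p = ""
    · simp [hp]
    · simp only [hp, if_neg, ne_eq, not_false_iff, true_and]
      by_cases hh : pvHits p fp.2
      · have hocc : pvOcc p (fp :: tl) = true := by simp [pvOcc, hh]
        cases hd : d.get? p with
        | some arr => simp [hh, pvBuild, htn]
        | none => simp [hh, hocc, pvBuild, htn]
      · have hocc : pvOcc p (fp :: tl) = pvOcc p tl := by simp [pvOcc, hh]
        cases hd : d.get? p with
        | some arr => simp [hh, pvBuild, htn]
        | none => simp [hh, hocc, pvBuild, htn]

lemma pv_build_window (p : String) :
    ∀ (sl : List (String × List String)) (arr : List Int) (i : Nat),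
      arr.length = i + sl.length →
      (∀ (j : Nat) (hj : j < arr.length), i ≤ j → arr[j] = 255) →
      pvBuild arr i sl p =
        arr.take i ++ sl.map (fun fp => if pvHits p fp.2 then (1 : Int) else 255) := by
  intro sl
  induction sl with
  | nil =>
    intro arr i hlen _
    have : arr.take i = arr := List.take_of_length_le (by simp at hlen; omega)
    simp [pvBuild, this]
  | cons fp tl ih =>
    intro arr i hlen h255
    have hi : i < arr.length := by simp at hlen; omega
    by_cases hh : pvHits p fp.2
    · have := ih (arr.set i 1) (i + 1)
        (by simpa using by simp at hlen ⊢; omega)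
        (by
          intro j hj hij
          rw [List.getElem_set_ne (by omega)]
          exact h255 j (by simpa using hj) (by omega))
      rw [show pvBuild arr i (fp :: tl) p = pvBuild (arr.set i 1) (i + 1) tl p by
        simp [pvBuild, hh]]
      rw [this]
      have : (arr.set i 1).take (i + 1) = arr.take i ++ [1] := by
        rw [List.take_add_one]
        simp [hi, List.take_set, List.set_eq_of_length_le (by simp [hi.le] : (arr.take i).length ≤ i)]
      simp [this, hh]
    · have := ih arr (i + 1) (by simp at hlen ⊢; omega)
        (fun j hj hij => h255 j hj (by omega))
      rw [show pvBuild arr i (fp :: tl) p = pvBuild arr (i + 1) tl p by simp [pvBuild, hh]]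
      rw [this]
      have : arr.take (i + 1) = arr.take i ++ [(255 : Int)] := by
        rw [List.take_add_one, List.getElem?_eq_getElem hi, h255 i hi (le_refl i)]
        rfl
      simp [this, hh]

lemma pv_join_empty_cons (x : String) (l : List String) :
    PySem.Str.join "" (x :: l) = x ++ PySem.Str.join "" l := by
  apply String.toList_inj.mp
  cases l with
  | nil => simp [PySem.Str.toList_join, PySem.Chars.join_singleton, PySem.Chars.join_nil]
  | cons y t =>
    simp [PySem.Str.toList_join, PySem.Chars.join_cons_cons]

lemma pv_final_eq (F : String → Option (List Int)) :
    ∀ (keys : List String) (s : String) (d : PySem.Dict String (List Int)),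
      keys.Nodup → (∀ q ∈ keys, d.get? q = F q) →
      (keys.foldl
        (fun (acc : String × PySem.Dict String (List Int)) pin =>
          let fl := if acc.2.contains pin then acc.2 else acc.2.insert pin []
          (acc.1 ++ make_pin_function_list_decl pin (fl.getD pin []), fl))
        (s, d)).1
      = s ++ PySem.Str.join "" (keys.map (fun p => make_pin_function_list_decl p ((F p).getD []))) := by
  intro keys
  induction keys with
  | nil => intro s d _ _; simp [PySem.Str.join]
  | cons p tl ih =>
    intro s d hnd hF
    simp only [List.foldl_cons]
    have hval : (if d.contains p then d else d.insert p []).getD p [] = ((F p).getD []) := by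
      rw [← hF p (by simp)]
      by_cases hc : d.contains p
      · obtain ⟨arr, harr⟩ : ∃ arr, d.get? p = some arr := by
          rw [PySem.Dict.contains_eq_isSome_get?] at hc
          exact Option.isSome_iff_exists.mp hc
        simp [hc, PySem.Dict.getD, harr]
      · have hnone : d.get? p = none := by
          rw [PySem.Dict.get?_eq_none_iff_contains]; simpa using hc
        simp [hc, PySem.Dict.getD, hnone]
    have hrest : ∀ q ∈ tl, (if d.contains p then d else d.insert p []).get? q = F q := by
      intro q hq
      have hne : q ≠ p := by rintro rfl; exact (List.nodup_cons.mp hnd).1 hq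
      by_cases hc : d.contains p <;>
        simp [hc, PySem.Dict.get?_insert_of_ne _ _ hne, hF q (by simp [hq])]
    rw [ih _ _ (List.nodup_cons.mp hnd).2 hrest, hval]
    rw [List.map_cons, pv_join_empty_cons, String.append_assoc]


lemma pv_occ_iff (functions : List (String × List String)) (p : String) (hp : p ≠ "") :
    pvOcc p (PySem.List.sorted (PySem.Dict.ofList functions).items (fun q => q.1) false) = true ↔
    PySem.Set.contains
      (PySem.Set.ofList ((PySem.Dict.ofList functions).values.flatMap
        (fun fcn_pins => (fcn_pins.map PySem.Str.lower).filter (fun q => q ≠ "")))) p = true := by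
  rw [PySem.Set.contains_iff, PySem.Set.mem_ofList, List.mem_flatMap]
  simp only [pvOcc, List.any_eq_true]
  constructor
  · rintro ⟨fp, hmem, hh⟩
    have hmem' : fp ∈ (PySem.Dict.ofList functions).items :=
      (PySem.List.sorted_perm _ _ _).mem_iff.mp hmem
    refine ⟨fp.2, ?_, ?_⟩
    · simp only [PySem.Dict.values, List.mem_map]
      exact ⟨fp, hmem', rfl⟩
    · simp only [List.mem_filter]
      refine ⟨by simpa [pvHits] using hh, by simpa using hp⟩
  · rintro ⟨ps, hmem, hin⟩
    simp only [PySem.Dict.values, List.mem_map] at hmem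
    obtain ⟨fp, hfp, rfl⟩ := hmem
    refine ⟨fp, (PySem.List.sorted_perm _ _ _).mem_iff.mpr hfp, ?_⟩
    simp only [List.mem_filter] at hin
    simpa [pvHits] using hin.1

lemma pv_perpin (functions : List (String × List String)) (p : String) :
    ((((PySem.List.sorted (PySem.Dict.ofList functions).items (fun q => q.1) false).foldl
        (pvStep (PySem.Dict.ofList functions).items.length)
        ((PySem.Dict.empty : PySem.Dict String (List Int)), (0 : Int))).1).get? p).getD []
    = (if PySem.Set.contains
          (PySem.Set.ofList ((PySem.Dict.ofList functions).values.flatMap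
            (fun fcn_pins => (fcn_pins.map PySem.Str.lower).filter (fun q => q ≠ "")))) p
       then (PySem.List.sorted (PySem.Dict.ofList functions).items (fun q => q.1) false).map
              (fun fp => if (fp.2.map PySem.Str.lower).contains p then (1 : Int) else 255)
       else []) := by
  rw [pv_outer_get? ((PySem.Dict.ofList functions).items.length) _ _ 0 (le_refl 0) p]
  by_cases hp : p = ""
  · have hc : PySem.Set.contains
        (PySem.Set.ofList ((PySem.Dict.ofList functions).values.flatMap
          (fun fcn_pins => (fcn_pins.map PySem.Str.lower).filter (fun q => q ≠ "")))) p = false := by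
      rw [← Bool.not_eq_true, PySem.Set.contains_iff, PySem.Set.mem_ofList, List.mem_flatMap]
      rintro ⟨ps, -, hin⟩
      have h2 := (List.mem_filter.mp hin).2
      simp at h2
      exact h2 hp
    simp [hp, PySem.Dict.get?_empty]
  · simp only [hp, if_neg, PySem.Dict.get?_empty, not_false_iff]
    by_cases ho : pvOcc p (PySem.List.sorted (PySem.Dict.ofList functions).items (fun q => q.1) false) = true
    · have hc := (pv_occ_iff functions p hp).mp ho
      rw [hc]
      simp only [ho, if_true, Option.getD_some, Int.toNat_zero]
      rw [pv_build_window p _ _ 0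
        (by simp [PySem.List.length_sorted])
        (by intro j hj _; simp)]
      simp [pvHits]
    · have hc : PySem.Set.contains
          (PySem.Set.ofList ((PySem.Dict.ofList functions).values.flatMap
            (fun fcn_pins => (fcn_pins.map PySem.Str.lower).filter (fun q => q ≠ "")))) p = false := by
        rw [← Bool.not_eq_true]
        exact fun h => ho ((pv_occ_iff functions p hp).mpr h)
      rw [hc]
      simp [Bool.not_eq_true] at ho
      simp [ho]

-- ===== VERDICT (by name: the statement is the Claim_ definition above) =====
theorem make_pin_function_lists_spec : Claim_equal_make_pin_function_lists := by
  unfold Claim_equal_make_pin_function_lists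
  intro functions pins _
  unfold Spec_make_pin_function_lists make_pin_function_lists make_pin_function_lists_alt
  simp only [pv_stepA_eq]
  rw [pv_final_eq
      (fun p => (((PySem.List.sorted (PySem.Dict.ofList functions).items (fun q => q.1) false).foldl
        (pvStep (PySem.Dict.ofList functions).items.length)
        ((PySem.Dict.empty : PySem.Dict String (List Int)), (0 : Int))).1).get? p)
      (PySem.Dict.ofList pins).keys "" _
      (PySem.Dict.nodup_keys_ofList pins) (fun q _ => rfl)]
  rw [String.empty_append]
  refine congrArg (PySem.Str.join "") (List.map_congr_left ?_)
  intro p _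
  rw [pv_perpin functions p]
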